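-- pv_equiv track=rewrite | github.com/pbrochar/ctr | ctr/core.py | _extract_ctr_block
-- ===== SOURCE A (Python) =====
-- def _extract_ctr_block(docstring: list[str], code_block: str):
--     ctr_block = []
--     inside_ctr = False
--
--     for line in docstring:
--         if inside_ctr:
--             if line.startswith(" "):  # Check if the line is indented
--                 ctr_block.append(line.strip())
--             else:
--                 break  # Exit the block if the indentation ends
--         elif line.strip() == code_block:
--             inside_ctr = True
--
--     return ctr_block
-- ===== SOURCE B (Python) =====
-- def _extract_ctr_block(docstring: list[str], code_block: str):
--     for i, line in enumerate(docstring):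
--         if line.strip() == code_block:
--             tail = docstring[i + 1:]
--             end = 0
--             while end < len(tail) and tail[end].startswith(" "):
--                 end += 1
--             return [l.strip() for l in tail[:end]]
--     return []
-- ===== Notes on version B (the rewrite author's own statement) =====
-- stated objective: alternative
-- what changed: Replaces A's single inside_ctr state-machine loop with a locate-then-takewhile decomposition: find the first anchor line, measure the run of indented lines after it, slice and strip.
import Mathlib
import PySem

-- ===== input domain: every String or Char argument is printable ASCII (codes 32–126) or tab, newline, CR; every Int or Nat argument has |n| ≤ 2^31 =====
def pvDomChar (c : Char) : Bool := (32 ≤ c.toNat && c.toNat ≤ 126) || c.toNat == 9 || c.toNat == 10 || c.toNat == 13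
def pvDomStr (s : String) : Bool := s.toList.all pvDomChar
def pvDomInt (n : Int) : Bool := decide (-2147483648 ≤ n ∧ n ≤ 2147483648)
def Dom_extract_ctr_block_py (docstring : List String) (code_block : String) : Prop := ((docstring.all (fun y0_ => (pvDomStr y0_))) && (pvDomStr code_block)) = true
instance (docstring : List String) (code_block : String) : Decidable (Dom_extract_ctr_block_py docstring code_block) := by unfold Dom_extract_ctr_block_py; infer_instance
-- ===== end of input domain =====

-- B replaces A's single inside_ctr state-machine loop with a locate-then-takewhile decomposition
-- (find anchor, measure the indented run after it, slice and strip); alternative, not faster.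

-- ===== PORT A =====
-- A's single loop over docstring with the inside_ctr flag as state; break = return [] tail.
def pvLoopA (code_block : String) : List String → Bool → List String
  | [], _ => []
  | line :: rest, true =>
      if PySem.Str.startswith line " " then PySem.Str.strip line :: pvLoopA code_block rest true
      else []
  | line :: rest, false =>
      if PySem.Str.strip line == code_block then pvLoopA code_block rest true
      else pvLoopA code_block rest false

def extract_ctr_block_py (docstring : List String) (code_block : String) : List String :=
  pvLoopA code_block docstring false

-- ===== PORT B =====
-- locate the first anchor line; returns the tail docstring[i+1:] after it (B's enumerate + slice).
def pvFindTail (code_block : String) : List String → Option (List String)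
  | [] => none
  | line :: rest => if PySem.Str.strip line == code_block then some rest else pvFindTail code_block rest

-- B's while loop counting the leading run of indented lines.
def pvRunLen : List String → Nat
  | [] => 0
  | line :: rest => if PySem.Str.startswith line " " then pvRunLen rest + 1 else 0

def extract_ctr_block_py_alt (docstring : List String) (code_block : String) : List String :=
  match pvFindTail code_block docstring with
  | none => []
  | some tail => (tail.take (pvRunLen tail)).map PySem.Str.strip

-- ===== PRECONDITION & SPEC =====
def Spec_extract_ctr_block_py (docstring : List String) (code_block : String) (out : List String) : Prop := out = extract_ctr_block_py_alt docstring code_block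
instance (docstring : List String) (code_block : String) (out : List String) : Decidable (Spec_extract_ctr_block_py docstring code_block out) := by unfold Spec_extract_ctr_block_py; infer_instance

-- ===== CLAIM (what is proved, stated in full; the proofs are below) =====
def Claim_equal_extract_ctr_block_py : Prop := ∀ (docstring : List String) (code_block : String), Dom_extract_ctr_block_py docstring code_block → Spec_extract_ctr_block_py docstring code_block (extract_ctr_block_py docstring code_block)

-- ===== LEMMAS AND PROOFS =====
-- A's inside_ctr=true phase equals B's take-run-then-strip computation.
theorem pvLoopA_true (cb : String) (xs : List String) :
    pvLoopA cb xs true = (xs.take (pvRunLen xs)).map PySem.Str.strip := by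
  induction xs with
  | nil => rfl
  | cons l rest ih =>
      simp only [pvLoopA, pvRunLen]
      by_cases h : PySem.Str.startswith l " " = true
      · simp only [if_pos h, List.take_succ_cons, List.map_cons, ih]
      · simp only [if_neg h, List.take_zero, List.map_nil]

theorem pvLoopA_false (cb : String) (xs : List String) :
    pvLoopA cb xs false = extract_ctr_block_py_alt xs cb := by
  induction xs with
  | nil => rfl
  | cons l rest ih =>
      by_cases h : (PySem.Str.strip l == cb) = true
      · simp only [pvLoopA, extract_ctr_block_py_alt, pvFindTail, if_pos h]
        exact pvLoopA_true cb rest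
      · simp only [pvLoopA, extract_ctr_block_py_alt, pvFindTail, if_neg h]
        exact ih

-- ===== VERDICT (by name: the statement is the Claim_ definition above) =====
theorem extract_ctr_block_py_spec : Claim_equal_extract_ctr_block_py := by
  intro docstring code_block _
  unfold Spec_extract_ctr_block_py extract_ctr_block_py
  exact pvLoopA_false code_block docstring
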